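-- pv_equiv track=rewrite | github.com/Vexiona/metrical-viewer | src/common.py | parse_syllables
-- ===== SOURCE A (Python) =====
-- def parse_syllables(text):
--     """Parse verse text into syllables with word-boundary info.
--
--     Delimiters:
--         space = syllable break + word boundary
--         #     = syllable break within a word
--
--     Returns list of (text, is_wordend) tuples.
--     """
--     syllables = []
--     current = []
--
--     for ch in text:
--         if ch == '#':
--             syllables.append((''.join(current), False))
--             current = []
--         elif ch == ' ':
--             current.append('\u00a0')
--             syllables.append((''.join(current), True))
--             current = []
--         else:
--             current.append(ch)
--
--     if current:
--         syllables.append((''.join(current), False))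
--
--     return syllables
-- ===== SOURCE B (Python) =====
-- def parse_syllables(text):
--     """Two-pointer scan: jump to the next delimiter with a cursor instead of
--     accumulating characters one by one."""
--     out = []
--     i = 0
--     n = len(text)
--     while i < n:
--         j = i
--         while j < n and text[j] != '#' and text[j] != ' ':
--             j += 1
--         if j == n or text[j] == '#':
--             out.append((text[i:j], False))
--         else:
--             out.append((text[i:j] + '\u00a0', True))
--         i = j + 1
--     return out
-- ===== Notes on version B (the rewrite author's own statement) =====
-- stated objective: alternative
-- what changed: Replaced the per-character accumulator loop with a two-pointer scan that jumps the cursor to the next delimiter and slices the syllable out in one step.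
import Mathlib
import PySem

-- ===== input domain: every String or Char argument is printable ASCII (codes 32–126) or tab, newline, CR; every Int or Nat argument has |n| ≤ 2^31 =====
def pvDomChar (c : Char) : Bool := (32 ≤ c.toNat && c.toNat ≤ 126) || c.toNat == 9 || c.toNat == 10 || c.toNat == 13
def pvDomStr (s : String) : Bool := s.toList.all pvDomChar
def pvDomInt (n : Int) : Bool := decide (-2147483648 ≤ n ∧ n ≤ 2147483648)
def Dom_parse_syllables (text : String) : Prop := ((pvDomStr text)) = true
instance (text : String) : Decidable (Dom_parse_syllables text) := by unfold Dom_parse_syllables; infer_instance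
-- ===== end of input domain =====

-- B replaces A's per-character accumulator loop by a two-pointer scan to the next delimiter (alternative decomposition, same cost).


-- ===== PORT A =====
-- A's `current` list of one-char strings is kept as a List Char; ''.join(current) is String.ofList.
def parseSylA_go (cur : List Char) : List Char → List (String × Bool)
  | [] => if cur ≠ [] then [(String.ofList cur, false)] else []
  | c :: cs =>
    if c = '#' then (String.ofList cur, false) :: parseSylA_go [] cs
    else if c = ' ' then (String.ofList (cur ++ ['\u00A0']), true) :: parseSylA_go [] cs
    else parseSylA_go (cur ++ [c]) cs

def parse_syllables (text : String) : List (String × Bool) :=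
  parseSylA_go [] text.toList

-- ===== PORT B =====
-- B's inner `while` (advance j past non-delimiters) as a helper returning (content, rest from the delimiter on).
def parseSylB_take : List Char → List Char × List Char
  | [] => ([], [])
  | c :: cs =>
    if c = '#' ∨ c = ' ' then ([], c :: cs)
    else
      let (t, r) := parseSylB_take cs
      (c :: t, r)

theorem parseSylB_take_len : ∀ (l : List Char), (parseSylB_take l).2.length ≤ l.length := by
  intro l
  induction l with
  | nil => simp [parseSylB_take]
  | cons c cs ih =>
    simp only [parseSylB_take]
    split
    · simp
    · simpa using Nat.le_succ_of_le ih

-- B's outer `while i < n` loop on the remaining characters.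
def parseSylB_go : List Char → List (String × Bool)
  | [] => []
  | c :: cs =>
    let p := parseSylB_take (c :: cs)
    match h : p.2 with
    | [] => [(String.ofList p.1, false)]
    | d :: rest =>
      if d = '#' then (String.ofList p.1, false) :: parseSylB_go rest
      else (String.ofList (p.1 ++ ['\u00A0']), true) :: parseSylB_go rest
  termination_by l => l.length
  decreasing_by
    all_goals
      have := parseSylB_take_len (c :: cs)
      rw [h] at this
      simp at this ⊢
      omega

def parse_syllables_alt (text : String) : List (String × Bool) :=
  parseSylB_go text.toList

-- ===== PRECONDITION & SPEC =====
def Spec_parse_syllables (text : String) (out : List (String × Bool)) : Prop := out = parse_syllables_alt text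
instance (text : String) (out : List (String × Bool)) : Decidable (Spec_parse_syllables text out) := by unfold Spec_parse_syllables; infer_instance

-- ===== CLAIM (what is proved, stated in full; the proofs are below) =====
def Claim_equal_parse_syllables : Prop := ∀ (text : String), Dom_parse_syllables text → Spec_parse_syllables text (parse_syllables text)

-- ===== LEMMAS AND PROOFS =====

-- What A's loop computes, phrased through B's tokenizer (cur generalizes A's accumulator).
def parseSylAB (cur : List Char) (l : List Char) : List (String × Bool) :=
  match parseSylB_take l with
  | (t, []) => if cur ++ t ≠ [] then [(String.ofList (cur ++ t), false)] else []
  | (t, d :: rest) =>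
    if d = '#' then (String.ofList (cur ++ t), false) :: parseSylB_go rest
    else (String.ofList (cur ++ t ++ ['\u00A0']), true) :: parseSylB_go rest

theorem parseSylB_go_eq_AB : ∀ (l : List Char), l ≠ [] → parseSylB_go l = parseSylAB [] l := by
  intro l hl
  match l with
  | [] => exact absurd rfl hl
  | c :: cs =>
    rw [parseSylB_go, parseSylAB]
    cases hp : parseSylB_take (c :: cs) with
    | mk t r =>
      cases r with
      | nil =>
        -- the content must be nonempty: the first char was consumed as content
        have ht : t ≠ [] := by
          simp only [parseSylB_take] at hp
          split at hp
          · simp at hp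
          · revert hp
            cases parseSylB_take cs with
            | mk t' r' => intro hp; simp at hp; simp [← hp.1]
        simp [ht]
      | cons d rest => simp

theorem parseSylA_go_eq : ∀ (l cur : List Char), parseSylA_go cur l = parseSylAB cur l := by
  intro l
  induction l with
  | nil =>
    intro cur
    simp only [parseSylA_go, parseSylAB, parseSylB_take, List.append_nil]
  | cons c cs ih =>
    intro cur
    have htail : parseSylA_go [] cs = parseSylB_go cs := by
      cases cs with
      | nil => simp [parseSylA_go, parseSylB_go]
      | cons d ds => rw [ih [], parseSylB_go_eq_AB _ (by simp)]
    by_cases hh : c = '#'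
    · subst hh
      simp [parseSylA_go, parseSylAB, parseSylB_take, htail]
    · by_cases hs : c = ' '
      · subst hs
        simp [parseSylA_go, parseSylAB, parseSylB_take, htail]
      · rw [parseSylA_go]
        rw [if_neg hh, if_neg hs, ih (cur ++ [c])]
        unfold parseSylAB
        simp only [parseSylB_take, if_neg (by tauto : ¬(c = '#' ∨ c = ' '))]
        cases hp : parseSylB_take cs with
        | mk t r =>
          cases r with
          | nil => simp
          | cons d rest => simp

-- ===== VERDICT (by name: the statement is the Claim_ definition above) =====
theorem parse_syllables_spec : Claim_equal_parse_syllables := by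
  intro text _
  unfold Spec_parse_syllables parse_syllables parse_syllables_alt
  rcases h : text.toList with _ | ⟨c, cs⟩
  · simp [parseSylA_go, parseSylB_go]
  · rw [parseSylA_go_eq, parseSylB_go_eq_AB _ (by simp)]
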